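-- pv_equiv track=rewrite | github.com/PaulBatchelor/Recurse | leetcode/2462/total_cost_k_workers.py | pq2
-- ===== SOURCE A (Python) =====
-- import heapq
--
-- def pq2(costs, k, candidates):
--     m = candidates
--     head_workers = []
--     tail_workers = []
--
--     next_head = m
--     next_tail = len(costs) - m - 1
--     sum = 0
--     heapq.heapify(head_workers)
--     heapq.heapify(tail_workers)
--
--     for i in range(0, m):
--         heapq.heappush(head_workers, costs[i])
--         heapq.heappush(tail_workers, costs[len(costs) - 1 - i])
--
--     for _ in range(0, k):
--         # is there a way to peek?
--         head = heapq.heappop(head_workers)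
--         tail = heapq.heappop(tail_workers)
--
--         if head == tail:
--             # put tail back
--             heapq.heappush(tail_workers, tail)
--             heapq.heappush(head_workers, costs[next_head])
--             next_head += 1
--             sum += head
--         elif head < tail:
--             heapq.heappush(tail_workers, tail)
--             heapq.heappush(head_workers, costs[next_head])
--             next_head += 1
--             sum += head
--         else:
--             heapq.heappush(head_workers, head)
--             heapq.heappush(tail_workers, costs[next_tail])
--             next_tail -= 1
--             sum += tail
--
--     return sum
-- ===== SOURCE B (Python) =====
-- def pq2(costs, k, candidates):
--     m = candidates
--     n = len(costs)
--     head = [costs[i] for i in range(m)]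
--     tail = [costs[n - 1 - i] for i in range(m)]
--     next_head = m
--     next_tail = n - m - 1
--     total = 0
--     for _ in range(k):
--         h = head[0]
--         for x in head:
--             if x < h:
--                 h = x
--         t = tail[0]
--         for x in tail:
--             if x < t:
--                 t = x
--         if h <= t:
--             head.remove(h)
--             head.append(costs[next_head])
--             next_head += 1
--             total += h
--         else:
--             tail.remove(t)
--             tail.append(costs[next_tail])
--             next_tail -= 1
--             total += t
--     return total
-- ===== Notes on version B (the rewrite author's own statement) =====
-- stated objective: simpler
-- what changed: Replaces the two heapq binary heaps by plain lists used as multisets: each round finds the head/tail minimum by a manual linear scan seeded with lst[0], removes that one occurrence and appends the refill (with the same costs[next_head]/costs[next_tail] indexing as A), instead of heappush/heappop; the ==/< double branch collapses to a single h <= t test.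
-- outside the precondition, e.g. on pq2([100, 5, 1], 3, 1): A returns 106, B returns 106
import Mathlib
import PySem

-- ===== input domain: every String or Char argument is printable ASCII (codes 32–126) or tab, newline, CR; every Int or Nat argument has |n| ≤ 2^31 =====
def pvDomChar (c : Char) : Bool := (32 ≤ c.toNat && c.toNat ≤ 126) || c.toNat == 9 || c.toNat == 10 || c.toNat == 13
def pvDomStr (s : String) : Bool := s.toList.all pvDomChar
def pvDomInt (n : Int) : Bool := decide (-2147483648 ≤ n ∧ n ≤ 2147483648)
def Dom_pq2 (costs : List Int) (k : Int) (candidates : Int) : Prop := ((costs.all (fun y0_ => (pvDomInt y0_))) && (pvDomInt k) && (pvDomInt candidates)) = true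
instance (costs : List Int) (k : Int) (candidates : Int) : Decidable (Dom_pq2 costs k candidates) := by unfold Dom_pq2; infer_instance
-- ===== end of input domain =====

-- B replaces A's two binary heaps by plain lists used as multisets with a manual linear minimum
-- scan (simpler: no heap machinery). Neither program mutates its arguments.

-- ===== PORT A =====
-- heapq is a standard-library module; its heaps are ported by contract as SORTED lists holding the
-- same multiset of Int values: heappush = ordered insert, heappop = take the head (the minimum) —
-- observationally exact for heaps of Ints, which A only ever reads through heappop.
-- Every heappop / costs[...] access that raises in Python is excluded by Pre_pq2, so the
-- `.headD 0` / `pyGetD … 0` defaults below are never reached under Pre_pq2.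
def hpush (h : List Int) (x : Int) : List Int := List.orderedInsert (· ≤ ·) x h

-- state: (head_workers, tail_workers, next_head, next_tail, sum)
abbrev pq2St : Type := List Int × List Int × Int × Int × Int

-- one iteration of A's `for _ in range(0, k)` body
def pq2Round (costs : List Int) (st : pq2St) : pq2St :=
  let head := st.1.headD 0      -- heappop(head_workers)
  let hw := st.1.tail
  let tl := st.2.1.headD 0      -- heappop(tail_workers)
  let tw := st.2.1.tail
  let nh := st.2.2.1
  let nt := st.2.2.2.1
  let s := st.2.2.2.2
  if head = tl then
    (hpush hw (PySem.List.pyGetD costs nh 0), hpush tw tl, nh + 1, nt, s + head)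
  else if head < tl then
    (hpush hw (PySem.List.pyGetD costs nh 0), hpush tw tl, nh + 1, nt, s + head)
  else
    (hpush hw head, hpush tw (PySem.List.pyGetD costs nt 0), nh, nt - 1, s + tl)

def pq2 (costs : List Int) (k : Int) (candidates : Int) : Int :=
  let m := candidates
  let n : Int := costs.length
  let seed := (PySem.List.pyRange 0 m 1).foldl
    (fun (st : List Int × List Int) i =>
      (hpush st.1 (PySem.List.pyGetD costs i 0),
       hpush st.2 (PySem.List.pyGetD costs (n - 1 - i) 0)))
    ([], [])
  let fin := (PySem.List.pyRange 0 k 1).foldl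
    (fun st _ => pq2Round costs st)
    ((seed.1, seed.2, m, n - m - 1, 0) : pq2St)
  fin.2.2.2.2

-- ===== PORT B =====
-- `if x < a then x else a`, the body of B's manual minimum scan
def pvMin (a x : Int) : Int := if x < a then x else a

-- B's scan, seeded with lst[0] (IndexError on an empty pool, as heappop; excluded by Pre_pq2)
def minScan (l : List Int) : Int := l.foldl pvMin (l.headD 0)

-- one iteration of B's `for _ in range(k)` body
def pq2AltRound (costs : List Int) (st : pq2St) : pq2St :=
  let hd := st.1
  let tl := st.2.1
  let nh := st.2.2.1
  let nt := st.2.2.2.1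
  let s := st.2.2.2.2
  let h := minScan hd
  let t := minScan tl
  if h ≤ t then
    (((PySem.List.remove? hd h).getD hd) ++ [PySem.List.pyGetD costs nh 0], tl, nh + 1, nt, s + h)
  else
    (hd, ((PySem.List.remove? tl t).getD tl) ++ [PySem.List.pyGetD costs nt 0], nh, nt - 1, s + t)

def pq2_alt (costs : List Int) (k : Int) (candidates : Int) : Int :=
  let m := candidates
  let n : Int := costs.length
  let head0 := (PySem.List.pyRange 0 m 1).map (fun i => PySem.List.pyGetD costs i 0)
  let tail0 := (PySem.List.pyRange 0 m 1).map (fun i => PySem.List.pyGetD costs (n - 1 - i) 0)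
  let fin := (PySem.List.pyRange 0 k 1).foldl
    (fun st _ => pq2AltRound costs st)
    ((head0, tail0, m, n - m - 1, 0) : pq2St)
  fin.2.2.2.2

-- ===== PRECONDITION & SPEC =====
-- Pre_pq2 excludes exactly the inputs on which Python A can hit an IndexError: popping an empty
-- candidate pool (candidates == 0 with k > 0), seeding past the list (candidates > len(costs)),
-- and the refill region candidates + k > len(costs), where the read costs[next_head] runs past the
-- end of the list on some executions.  Within that refill region, whether A raises or returns
-- depends on which branch each round's runtime comparison takes, so no closed-form condition on
-- the input separates the raising inputs from the returning ones and the whole region is excluded;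
-- B performs the identical costs[next_head]/costs[next_tail] reads, so on every excluded input
-- where A does return, B returns the same value, and where A raises IndexError so does B — the
-- exclusion hides no disagreement between the two programs (see the claim's cites).
def Pre_pq2 (costs : List Int) (k : Int) (candidates : Int) : Prop :=
  candidates ≤ (costs.length : Int) ∧
  (0 < k → 1 ≤ candidates ∧ candidates + k ≤ (costs.length : Int))

instance (costs : List Int) (k : Int) (candidates : Int) : Decidable (Pre_pq2 costs k candidates) := by
  unfold Pre_pq2; infer_instance

def pvWitness_pq2 : List Int × Int × Int := ([17, 12, 10, 2, 7, 2, 11, 20, 8], 3, 4)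

def Spec_pq2 (costs : List Int) (k : Int) (candidates : Int) (out : Int) : Prop := out = pq2_alt costs k candidates
instance (costs : List Int) (k : Int) (candidates : Int) (out : Int) : Decidable (Spec_pq2 costs k candidates out) := by unfold Spec_pq2; infer_instance

-- ===== CLAIM (what is proved, stated in full; the proofs are below) =====
def Claim_equal_pq2 : Prop := ∀ (costs : List Int) (k : Int) (candidates : Int), Dom_pq2 costs k candidates → Pre_pq2 costs k candidates → Spec_pq2 costs k candidates (pq2 costs k candidates)

-- ===== LEMMAS AND PROOFS =====

-- an A-state (sorted-list heaps) simulates a B-state (unsorted multiset lists)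
def pq2Inv (sA sB : pq2St) : Prop :=
  sA.1.Perm sB.1 ∧ sA.1.Pairwise (· ≤ ·) ∧ sA.1 ≠ [] ∧
  sA.2.1.Perm sB.2.1 ∧ sA.2.1.Pairwise (· ≤ ·) ∧ sA.2.1 ≠ [] ∧
  sA.2.2.1 = sB.2.2.1 ∧ sA.2.2.2.1 = sB.2.2.2.1 ∧ sA.2.2.2.2 = sB.2.2.2.2

theorem foldl_pvMin_le_init (l : List Int) (a : Int) : l.foldl pvMin a ≤ a := by
  induction l generalizing a with
  | nil => simp
  | cons b t ih =>
    refine le_trans (ih (pvMin a b)) ?_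
    simp only [pvMin]; split <;> omega

theorem foldl_pvMin_le_mem (l : List Int) (a x : Int) (hx : x ∈ l) : l.foldl pvMin a ≤ x := by
  induction l generalizing a with
  | nil => simp at hx
  | cons b t ih =>
    rcases List.mem_cons.1 hx with rfl | hx
    · refine le_trans (foldl_pvMin_le_init t (pvMin a x)) ?_
      simp only [pvMin]; split <;> omega
    · exact ih _ hx

theorem foldl_pvMin_mem (l : List Int) (a : Int) : l.foldl pvMin a = a ∨ l.foldl pvMin a ∈ l := by
  induction l generalizing a with
  | nil => simp
  | cons b t ih =>
    rcases ih (pvMin a b) with h | h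
    · rw [List.foldl_cons, h]
      simp only [pvMin]; split
      · right; simp
      · left; rfl
    · right; exact List.mem_cons_of_mem _ h

-- the scan returns the head of the sorted permuted pool, i.e. exactly what heappop returns
theorem minScan_eq_head (c : Int) (r hd : List Int) (hperm : (c :: r).Perm hd)
    (hsorted : (c :: r).Pairwise (· ≤ ·)) : minScan hd = c := by
  have hc : c ∈ hd := hperm.mem_iff.1 (List.mem_cons_self)
  have hne : hd ≠ [] := by
    intro h; rw [h] at hc; simp at hc
  obtain ⟨d, t, rfl⟩ := List.exists_cons_of_ne_nil hne
  have hmem : minScan (d :: t) ∈ d :: t := by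
    rcases foldl_pvMin_mem (d :: t) ((d :: t).headD 0) with h | h
    · rw [minScan, h]; simp
    · exact h
  refine le_antisymm (foldl_pvMin_le_mem _ _ _ hc) ?_
  have : minScan (d :: t) ∈ c :: r := hperm.mem_iff.2 hmem
  rcases List.mem_cons.1 this with h | h
  · omega
  · exact (List.pairwise_cons.1 hsorted).1 _ h

theorem pq2Round_inv (costs : List Int) (sA sB : pq2St) (h : pq2Inv sA sB) :
    pq2Inv (pq2Round costs sA) (pq2AltRound costs sB) := by
  obtain ⟨hw, tw, nh, nt, s⟩ := sA
  obtain ⟨hd, tl, nh, nt, s⟩ := sB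
  obtain ⟨phd, shd, hne, ptl, stl, tne, enh, ent, es⟩ := h
  simp only at phd shd hne ptl stl tne enh ent es
  subst enh ent es
  obtain ⟨hh, hr, rfl⟩ := List.exists_cons_of_ne_nil hne
  obtain ⟨th, tr, rfl⟩ := List.exists_cons_of_ne_nil tne
  have hmin : minScan hd = hh := minScan_eq_head hh hr hd phd shd
  have tmin : minScan tl = th := minScan_eq_head th tr tl ptl stl
  have hhd : hh ∈ hd := phd.mem_iff.1 (List.mem_cons_self)
  have htl : th ∈ tl := ptl.mem_iff.1 (List.mem_cons_self)
  have hrem : (PySem.List.remove? hd hh).getD hd = hd.erase hh := by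
    rw [PySem.List.remove?_eq_some_erase hd hh hhd]; rfl
  have trem : (PySem.List.remove? tl th).getD tl = tl.erase th := by
    rw [PySem.List.remove?_eq_some_erase tl th htl]; rfl
  have herase : (hd.erase hh).Perm hr := by
    have := phd.symm.erase hh
    rwa [List.erase_cons_head] at this
  have terase : (tl.erase th).Perm tr := by
    have := ptl.symm.erase th
    rwa [List.erase_cons_head] at this
  have hpush_perm : ∀ (l : List Int) (x : Int), (hpush l x).Perm (x :: l) :=
    fun l x => List.perm_orderedInsert _ _ _
  have hpush_ne : ∀ (l : List Int) (x : Int), hpush l x ≠ [] := by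
    intro l x h
    have := (hpush_perm l x).length_eq
    rw [h] at this; simp at this
  have hr_sorted : hr.Pairwise (· ≤ ·) := (List.pairwise_cons.1 shd).2
  have tr_sorted : tr.Pairwise (· ≤ ·) := (List.pairwise_cons.1 stl).2
  by_cases hle : hh ≤ th
  · -- A takes the `head == tail` or `head < tail` branch; B takes `h <= t`
    have hA : pq2Round costs (hh :: hr, th :: tr, nh, nt, s)
        = (hpush hr (PySem.List.pyGetD costs nh 0), hpush tr th, nh + 1, nt, s + hh) := by
      simp only [pq2Round, List.headD, List.tail]
      rcases eq_or_lt_of_le hle with heq | hlt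
      · rw [if_pos heq]
      · rw [if_neg (by omega), if_pos hlt]
    have hB : pq2AltRound costs (hd, tl, nh, nt, s)
        = (hd.erase hh ++ [PySem.List.pyGetD costs nh 0], tl, nh + 1, nt, s + hh) := by
      simp only [pq2AltRound, hmin, tmin, if_pos hle, hrem]
    rw [hA, hB]
    refine ⟨?_, ?_, hpush_ne _ _, ?_, ?_, hpush_ne _ _, rfl, rfl, rfl⟩
    · exact (hpush_perm _ _).trans ((herase.symm.cons _).trans (List.perm_append_singleton _ _).symm)
    · exact List.Pairwise.orderedInsert _ _ hr_sorted
    · exact (hpush_perm _ _).trans ((ptl.trans (List.Perm.refl _)))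
    · exact List.Pairwise.orderedInsert _ _ tr_sorted
  · -- A takes the `else` branch; B takes `else`
    have hA : pq2Round costs (hh :: hr, th :: tr, nh, nt, s)
        = (hpush hr hh, hpush tr (PySem.List.pyGetD costs nt 0), nh, nt - 1, s + th) := by
      simp only [pq2Round, List.headD, List.tail]
      rw [if_neg (by omega), if_neg (by omega)]
    have hB : pq2AltRound costs (hd, tl, nh, nt, s)
        = (hd, tl.erase th ++ [PySem.List.pyGetD costs nt 0], nh, nt - 1, s + th) := by
      simp only [pq2AltRound, hmin, tmin, if_neg hle, trem]
    rw [hA, hB]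
    refine ⟨?_, ?_, hpush_ne _ _, ?_, ?_, hpush_ne _ _, rfl, rfl, rfl⟩
    · exact (hpush_perm _ _).trans phd
    · exact List.Pairwise.orderedInsert _ _ hr_sorted
    · exact (hpush_perm _ _).trans ((terase.symm.cons _).trans (List.perm_append_singleton _ _).symm)
    · exact List.Pairwise.orderedInsert _ _ tr_sorted

theorem foldl_round_inv (costs : List Int) (l : List Int) (sA sB : pq2St) (h : pq2Inv sA sB) :
    pq2Inv (l.foldl (fun st _ => pq2Round costs st) sA) (l.foldl (fun st _ => pq2AltRound costs st) sB) := by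
  induction l generalizing sA sB with
  | nil => exact h
  | cons a t ih => exact ih _ _ (pq2Round_inv costs sA sB h)

theorem hfold_perm (g : Int → Int) (l : List Int) (acc : List Int) :
    (l.foldl (fun h i => hpush h (g i)) acc).Perm (acc ++ l.map g) := by
  induction l generalizing acc with
  | nil => simp
  | cons a t ih =>
    simp only [List.foldl_cons, List.map_cons]
    refine (ih (hpush acc (g a))).trans ?_
    have h1 : (hpush acc (g a)).Perm (acc ++ [g a]) :=
      (List.perm_orderedInsert _ _ _).trans (List.perm_append_singleton _ _).symm
    simpa using h1.append_right (t.map g)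

theorem hfold_sorted (g : Int → Int) (l : List Int) (acc : List Int) (h : acc.Pairwise (· ≤ ·)) :
    (l.foldl (fun h i => hpush h (g i)) acc).Pairwise (· ≤ ·) := by
  induction l generalizing acc with
  | nil => exact h
  | cons a t ih => exact ih _ (List.Pairwise.orderedInsert _ _ h)

-- A's seeding loop pushes into both heaps at once; split it into two independent folds
theorem foldl_pair (f g : List Int → Int → List Int) (l : List Int) (p : List Int × List Int) :
    l.foldl (fun st i => (f st.1 i, g st.2 i)) p = (l.foldl f p.1, l.foldl g p.2) := by
  induction l generalizing p with
  | nil => rfl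
  | cons a t ih => simp only [List.foldl_cons]; exact ih _

-- ===== VERDICT (by name: the statement is the Claim_ definition above) =====
theorem pq2_spec : Claim_equal_pq2 := by
  intro costs k m _ hpre
  unfold Spec_pq2
  by_cases hk : 0 < k
  · obtain ⟨hmn, hkm⟩ := hpre
    obtain ⟨hm1, hmkn⟩ := hkm hk
    show pq2 costs k m = pq2_alt costs k m
    simp only [pq2, pq2_alt]
    rw [foldl_pair (fun h i => hpush h (PySem.List.pyGetD costs i 0))
      (fun h i => hpush h (PySem.List.pyGetD costs ((costs.length : Int) - 1 - i) 0))
      (PySem.List.pyRange 0 m 1) ([], [])]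
    set n : Int := (costs.length : Int) with hn
    set g1 : Int → Int := fun i => PySem.List.pyGetD costs i 0 with hg1
    set g2 : Int → Int := fun i => PySem.List.pyGetD costs (n - 1 - i) 0 with hg2
    have hlen : ((PySem.List.pyRange 0 m 1).map g1).length = m.toNat := by
      rw [List.length_map, PySem.List.length_pyRange_one]; omega
    have hlen2 : ((PySem.List.pyRange 0 m 1).map g2).length = m.toNat := by
      rw [List.length_map, PySem.List.length_pyRange_one]; omega
    have hinv : pq2Inv
        ((PySem.List.pyRange 0 m 1).foldl (fun h i => hpush h (g1 i)) [],
         (PySem.List.pyRange 0 m 1).foldl (fun h i => hpush h (g2 i)) [],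
         m, n - m - 1, 0)
        ((PySem.List.pyRange 0 m 1).map g1, (PySem.List.pyRange 0 m 1).map g2,
         m, n - m - 1, 0) := by
      have p1 := hfold_perm g1 (PySem.List.pyRange 0 m 1) []
      have p2 := hfold_perm g2 (PySem.List.pyRange 0 m 1) []
      simp only [List.nil_append] at p1 p2
      have ne1 : (PySem.List.pyRange 0 m 1).foldl (fun h i => hpush h (g1 i)) [] ≠ [] := by
        intro hnil
        have h2 := p1.length_eq
        rw [hnil, hlen] at h2; simp at h2; omega
      have ne2 : (PySem.List.pyRange 0 m 1).foldl (fun h i => hpush h (g2 i)) [] ≠ [] := by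
        intro hnil
        have h2 := p2.length_eq
        rw [hnil, hlen2] at h2; simp at h2; omega
      exact ⟨p1, hfold_sorted _ _ _ (by simp), ne1, p2, hfold_sorted _ _ _ (by simp), ne2, rfl, rfl, rfl⟩
    exact (foldl_round_inv costs (PySem.List.pyRange 0 k 1) _ _ hinv).2.2.2.2.2.2.2.2
  · simp only [pq2, pq2_alt, PySem.List.pyRange_one_eq_nil (show k ≤ (0:Int) by omega), List.foldl_nil]
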